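-- pv_equiv track=rewrite | github.com/oumseyoung/CodingTest | 프로그래머스/0/181932. 코드 처리하기/코드 처리하기.py | solution
-- ===== SOURCE A (Python) =====
-- def solution(code):
--     mode = 0
--     ret = ''
--     for idx in range(len(code)):
--         if mode == 0:
--             if code[idx] == '1': mode = 1
--             elif idx % 2 == 0: ret = ret + code[idx]
--         else:
--             if code[idx] == '1': mode = 0
--             elif idx % 2: ret = ret + code[idx]
--     if ret == '': return 'EMPTY'
--     else: return ret
-- ===== SOURCE B (Python) =====
-- def solution(code):
--     # pass 1: exclusive prefix counts of '1's
--     pref = []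
--     ones = 0
--     for c in code:
--         pref.append(ones)
--         if c == '1':
--             ones += 1
--     # pass 2: keep code[i] when it is not '1' and i's parity matches the prefix parity
--     res = ''.join(code[i] for i in range(len(code))
--                   if code[i] != '1' and i % 2 == pref[i] % 2)
--     return res if res else 'EMPTY'
-- ===== Notes on version B (the rewrite author's own statement) =====
-- stated objective: alternative
-- what changed: Replaces the one-pass mutable toggle/accumulator with two passes: first an exclusive prefix count of '1's, then a join of a comprehension keeping code[i] whenever code[i] != '1' and i's parity matches the prefix parity.
import Mathlib
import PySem

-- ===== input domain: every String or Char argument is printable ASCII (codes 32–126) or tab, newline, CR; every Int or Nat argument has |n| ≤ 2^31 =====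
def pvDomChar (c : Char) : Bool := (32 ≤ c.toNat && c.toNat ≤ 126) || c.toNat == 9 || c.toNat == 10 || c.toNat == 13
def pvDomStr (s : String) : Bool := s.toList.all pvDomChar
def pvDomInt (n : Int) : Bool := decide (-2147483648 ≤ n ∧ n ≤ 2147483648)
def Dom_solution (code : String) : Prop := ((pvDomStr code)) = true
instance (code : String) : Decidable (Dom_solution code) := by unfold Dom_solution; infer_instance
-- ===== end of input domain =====

-- B replaces A's one-pass mutable toggle with a prefix-count-then-filter two-pass shape (alternative decomposition, same result).

-- ===== PORT A =====
-- A's loop over idx in range(len(code)) with state (mode, ret); ret is the list of kept chars in order.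
def solutionLoop : List Char → Nat → Nat → List Char → List Char
  | [], _, _, ret => ret
  | c :: cs, idx, mode, ret =>
    if mode = 0 then
      if c = '1' then solutionLoop cs (idx + 1) 1 ret
      else if idx % 2 = 0 then solutionLoop cs (idx + 1) mode (ret ++ [c])
      else solutionLoop cs (idx + 1) mode ret
    else
      if c = '1' then solutionLoop cs (idx + 1) 0 ret
      else if idx % 2 ≠ 0 then solutionLoop cs (idx + 1) mode (ret ++ [c])
      else solutionLoop cs (idx + 1) mode ret

def solution (code : String) : String :=
  let ret := solutionLoop code.toList 0 0 []
  if ret = [] then "EMPTY" else String.mk ret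

-- ===== PORT B =====
-- pass 1: exclusive prefix counts of '1's
def prefOnes : List Char → Nat → List Nat
  | [], _ => []
  | c :: cs, n => n :: prefOnes cs (n + if c = '1' then 1 else 0)

-- pass 2: the comprehension, walking chars and their prefix counts with the index
def filtKeep : List Char → List Nat → Nat → List Char
  | c :: cs, p :: ps, i =>
    (if c ≠ '1' ∧ i % 2 = p % 2 then [c] else []) ++ filtKeep cs ps (i + 1)
  | _, _, _ => []

def solution_alt (code : String) : String :=
  let cs := code.toList
  let res := filtKeep cs (prefOnes cs 0) 0
  if res = [] then "EMPTY" else String.mk res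

-- ===== PRECONDITION & SPEC =====
def Spec_solution (code : String) (out : String) : Prop := out = solution_alt code
instance (code : String) (out : String) : Decidable (Spec_solution code out) := by unfold Spec_solution; infer_instance

-- ===== CLAIM (what is proved, stated in full; the proofs are below) =====
def Claim_equal_solution : Prop := ∀ (code : String), Dom_solution code → Spec_solution code (solution code)

-- ===== LEMMAS AND PROOFS =====
-- A's mode equals the running count of '1's mod 2, and A appends exactly when the index
-- parity matches it — i.e. B's exclusive-prefix-parity condition.
lemma loop_eq_filt (cs : List Char) (idx n : Nat) (ret : List Char) :
    solutionLoop cs idx (n % 2) ret = ret ++ filtKeep cs (prefOnes cs n) idx := by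
  induction cs generalizing idx n ret with
  | nil => simp [solutionLoop, filtKeep]
  | cons c cs ih =>
    by_cases h1 : c = '1'
    · subst h1
      by_cases hm : n % 2 = 0
      · have e : solutionLoop ('1' :: cs) idx (n % 2) ret
            = solutionLoop cs (idx + 1) 1 ret := by simp [solutionLoop, hm]
        have e2 : (1 : Nat) = (n + 1) % 2 := by omega
        have h := ih (idx + 1) (n + 1) ret
        rw [← e2] at h
        rw [e, h]
        simp [filtKeep, prefOnes]
      · have e : solutionLoop ('1' :: cs) idx (n % 2) ret
            = solutionLoop cs (idx + 1) 0 ret := by simp [solutionLoop, hm]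
        have e2 : (0 : Nat) = (n + 1) % 2 := by omega
        have h := ih (idx + 1) (n + 1) ret
        rw [← e2] at h
        rw [e, h]
        simp [filtKeep, prefOnes]
    · have epref : prefOnes (c :: cs) n = n :: prefOnes cs n := by simp [prefOnes, h1]
      by_cases hk : idx % 2 = n % 2
      · have e : solutionLoop (c :: cs) idx (n % 2) ret
            = solutionLoop cs (idx + 1) (n % 2) (ret ++ [c]) := by
          by_cases hm : n % 2 = 0
          · simp [solutionLoop, hm, h1, hm ▸ hk]
          · have hm1 : n % 2 = 1 := by omega
            have hi1 : idx % 2 ≠ 0 := by omega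
            simp [solutionLoop, hm, h1, hi1]
        rw [e, ih]
        simp [filtKeep, epref, h1, hk]
      · have e : solutionLoop (c :: cs) idx (n % 2) ret
            = solutionLoop cs (idx + 1) (n % 2) ret := by
          by_cases hm : n % 2 = 0
          · have hi1 : idx % 2 ≠ 0 := by omega
            simp [solutionLoop, hm, h1, hi1]
          · have hm1 : n % 2 = 1 := by omega
            have hi0 : idx % 2 = 0 := by omega
            simp [solutionLoop, hm, h1, hi0]
        rw [e, ih]
        simp [filtKeep, epref, h1, hk]

-- ===== VERDICT (by name: the statement is the Claim_ definition above) =====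
theorem solution_spec : Claim_equal_solution := by
  intro code _
  unfold Spec_solution solution solution_alt
  have h := loop_eq_filt code.toList 0 0 []
  simp only [Nat.zero_mod, List.nil_append] at h
  rw [h]
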